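-- pv_equiv track=rewrite | github.com/Akash-Sharma1/Code-Visualizer | codevisualizer/codevis/cppupd.py | comment_cout
-- ===== SOURCE A (Python) =====
-- def comment_cout(code):
--     ln = code.splitlines(True)
--     final = ""
--     i = 0
--     while i < len(ln):
--         t = ln[i].find("cout")
--         if t != -1:
--             temp = ln[i][:t] + "//"
--             t2 = ln[i][t:].find(';')
--             if(t2 != -1):
--                 temp += ln[i][t:t+t2+1]
--                 ln.insert(i+1,ln[i][t+t2+1:])
--             ln[i] = temp
--             #i = i[:t] + "//" + i[t:]
--         final += ln[i]
--         #fo.write(ln[i])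
--         i+=1
--     return final
-- ===== SOURCE B (Python) =====
-- def comment_cout(code):
--     out = []
--     for line in code.splitlines(True):
--         s = line
--         while True:
--             t = s.find("cout")
--             if t == -1:
--                 out.append(s)
--                 break
--             t2 = s[t:].find(';')
--             if t2 == -1:
--                 out.append(s[:t] + "//")
--                 break
--             out.append(s[:t] + "//" + s[t:t+t2+1])
--             s = s[t+t2+1:]
--     return "".join(out)
-- ===== Notes on version B (the rewrite author's own statement) =====
-- stated objective: simpler
-- what changed: Replaces A's index-driven while loop that mutates the line list (ln.insert of the remainder, reprocessed as a fresh line) with a plain per-line inner loop that emits the commented pieces into an output list joined at the end.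
import Mathlib
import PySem

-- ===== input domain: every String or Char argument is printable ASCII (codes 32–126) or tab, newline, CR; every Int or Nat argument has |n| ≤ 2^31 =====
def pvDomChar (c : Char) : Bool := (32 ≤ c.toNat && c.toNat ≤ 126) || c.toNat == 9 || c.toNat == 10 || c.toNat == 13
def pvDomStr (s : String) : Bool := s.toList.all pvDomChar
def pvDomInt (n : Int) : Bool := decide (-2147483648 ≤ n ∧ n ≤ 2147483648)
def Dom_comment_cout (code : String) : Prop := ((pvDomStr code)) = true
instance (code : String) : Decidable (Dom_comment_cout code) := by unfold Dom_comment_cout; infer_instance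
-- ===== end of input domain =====

-- B replaces A's mutating-list/insert reprocessing trick with a per-line inner loop; objective: simpler decomposition (same cost).

-- shared helper: code.splitlines(True) (keepends), hand-ported; exact on Dom (line breaks there are '\n', '\r', '\r\n')
def pvSplitKeep (acc : List Char) : List Char → List (List Char)
  | [] => if acc = [] then [] else [acc.reverse]
  | '\r' :: '\n' :: rest => (acc.reverse ++ ['\r', '\n']) :: pvSplitKeep [] rest
  | '\r' :: rest => (acc.reverse ++ ['\r']) :: pvSplitKeep [] rest
  | '\n' :: rest => (acc.reverse ++ ['\n']) :: pvSplitKeep [] rest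
  | c :: rest => pvSplitKeep (c :: acc) rest

-- shared helpers: t = line.find("cout") and t2 = line[t:].find(';'), computed by both Pythons
def pvT (l : List Char) : Int := PySem.Chars.find l ['c', 'o', 'u', 't']
def pvT2 (l : List Char) : Int := PySem.Chars.find (PySem.List.slice l (some (pvT l))) [';']

-- termination helper for both ports: s[t+t2+1:] is strictly shorter than s when "cout" and ';' were found
theorem pvSliceLen (l : List Char) (ht : pvT l ≠ -1) (ht2 : pvT2 l ≠ -1) :
    (PySem.List.slice l (some (pvT l + pvT2 l + 1))).length < l.length := by
  have h0 : (-1 : Int) ≤ pvT l := PySem.Chars.neg_one_le_find l _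
  have h1 : (-1 : Int) ≤ pvT2 l := PySem.Chars.neg_one_le_find _ _
  have hinf : ['c','o','u','t'] <:+: l := by
    rw [← PySem.Chars.find_ne_neg_one_iff]; exact ht
  have hlen : 4 ≤ l.length := hinf.length_le
  rw [PySem.List.slice_from l (a := pvT l + pvT2 l + 1) (by omega)]
  simp only [List.length_drop]
  omega

-- ===== PORT A =====
-- A's mutating while loop over the line list: ln.insert(i+1, remainder) then i += 1 = pushing the remainder as the next head
def commentLoopA : List (List Char) → List Char
  | [] => []
  | l :: rest =>
    if _ht : pvT l ≠ -1 then
      if _ht2 : pvT2 l ≠ -1 then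
        ((PySem.List.slice l none (some (pvT l)) ++ ['/', '/'])
            ++ PySem.List.slice l (some (pvT l)) (some (pvT l + pvT2 l + 1)))
          ++ commentLoopA (PySem.List.slice l (some (pvT l + pvT2 l + 1)) :: rest)
      else
        (PySem.List.slice l none (some (pvT l)) ++ ['/', '/']) ++ commentLoopA rest
    else
      l ++ commentLoopA rest
termination_by ls => (ls.map (fun l => l.length + 1)).sum
decreasing_by
  · have := pvSliceLen l _ht _ht2
    simp only [List.map_cons, List.sum_cons]
    omega
  · simp only [List.map_cons, List.sum_cons]; omega
  · simp only [List.map_cons, List.sum_cons]; omega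

def comment_cout (code : String) : String :=
  String.ofList (commentLoopA (pvSplitKeep [] code.toList))

-- ===== PORT B =====
-- B's inner while loop on one line, emitting pieces
def commentInnerB (s : List Char) : List Char :=
  if ht : pvT s = -1 then s
  else
    if ht2 : pvT2 s = -1 then
      PySem.List.slice s none (some (pvT s)) ++ ['/', '/']
    else
      (PySem.List.slice s none (some (pvT s)) ++ ['/', '/']
          ++ PySem.List.slice s (some (pvT s)) (some (pvT s + pvT2 s + 1)))
        ++ commentInnerB (PySem.List.slice s (some (pvT s + pvT2 s + 1)))
termination_by s.length
decreasing_by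
  exact pvSliceLen s ht ht2

def comment_cout_alt (code : String) : String :=
  String.ofList (((pvSplitKeep [] code.toList).map commentInnerB).flatten)

-- ===== PRECONDITION & SPEC =====
def Spec_comment_cout (code : String) (out : String) : Prop := out = comment_cout_alt code
instance (code : String) (out : String) : Decidable (Spec_comment_cout code out) := by unfold Spec_comment_cout; infer_instance

-- ===== CLAIM (what is proved, stated in full; the proofs are below) =====
def Claim_equal_comment_cout : Prop := ∀ (code : String), Dom_comment_cout code → Spec_comment_cout code (comment_cout code)

-- ===== LEMMAS AND PROOFS =====
theorem loopA_cons (n : Nat) : ∀ (l : List Char), l.length ≤ n → ∀ rest,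
    commentLoopA (l :: rest) = commentInnerB l ++ commentLoopA rest := by
  induction n with
  | zero =>
    intro l hl rest
    have hl0 : l = [] := List.length_eq_zero_iff.mp (Nat.le_zero.mp hl)
    subst hl0
    have ht : pvT ([] : List Char) = -1 := by decide
    rw [commentLoopA, commentInnerB]
    simp [ht]
  | succ n ih =>
    intro l hl rest
    rw [commentLoopA, commentInnerB]
    by_cases ht : pvT l = -1
    · simp [ht]
    · by_cases ht2 : pvT2 l = -1
      · simp [ht, ht2]
      · have hlt := pvSliceLen l ht ht2
        rw [dif_pos ht, dif_pos ht2, dif_neg ht, dif_neg ht2,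
          ih (PySem.List.slice l (some (pvT l + pvT2 l + 1))) (by omega) rest]
        simp [List.append_assoc]

theorem loopA_eq_flat : ∀ (ls : List (List Char)),
    commentLoopA ls = (ls.map commentInnerB).flatten := by
  intro ls
  induction ls with
  | nil => rw [commentLoopA]; simp
  | cons l rest ih =>
    rw [loopA_cons l.length l le_rfl rest, ih]; simp

-- ===== VERDICT (by name: the statement is the Claim_ definition above) =====
theorem comment_cout_spec : Claim_equal_comment_cout := by
  intro code _
  unfold Spec_comment_cout comment_cout comment_cout_alt
  rw [loopA_eq_flat]
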